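-- pv_equiv track=rewrite | github.com/riccaran/irish_learn_temp | irish_ex/conj_exercises.py | process_letters
-- ===== SOURCE A (Python) =====
-- def process_letters(word):
--     accents = {
--         "a_x": "á",
--         "e_x": "é",
--         "i_x": "í",
--         "o_x": "ó",
--         "u_x": "ú"
--     }
--     for key, value in accents.items():
--         word = word.replace(key, value)
--     return word
-- ===== SOURCE B (Python) =====
-- def process_letters(word):
--     accents = {"a": "\u00e1", "e": "\u00e9", "i": "\u00ed", "o": "\u00f3", "u": "\u00fa"}
--     out = []
--     i = 0
--     n = len(word)
--     while i < n:
--         c = word[i]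
--         if c in accents and word[i + 1:i + 3] == "_x":
--             out.append(accents[c])
--             i += 3
--         else:
--             out.append(c)
--             i += 1
--     return "".join(out)
-- ===== Notes on version B (the rewrite author's own statement) =====
-- stated objective: alternative
-- what changed: Replaced five sequential full-string replace passes (one per accent marker) by a single left-to-right scan that checks the two-character lookahead after each vowel and emits the accented letter directly.
import Mathlib
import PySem

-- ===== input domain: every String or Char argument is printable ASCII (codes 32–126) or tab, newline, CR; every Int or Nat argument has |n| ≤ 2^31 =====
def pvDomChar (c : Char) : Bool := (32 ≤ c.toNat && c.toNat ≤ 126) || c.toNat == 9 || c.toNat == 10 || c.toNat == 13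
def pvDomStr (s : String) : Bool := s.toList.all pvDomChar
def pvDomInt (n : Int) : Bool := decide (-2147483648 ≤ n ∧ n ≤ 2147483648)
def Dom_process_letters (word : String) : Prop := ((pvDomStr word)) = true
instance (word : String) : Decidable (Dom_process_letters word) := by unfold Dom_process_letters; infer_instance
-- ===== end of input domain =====

-- B replaces A's five sequential full-string replace passes by one left-to-right
-- scan with a two-character lookahead (objective: alternative decomposition).

-- ===== PORT A =====
def process_letters (word : String) : String :=
  let accents : PySem.Dict String String :=
    PySem.Dict.mk [("a_x", "á"), ("e_x", "é"), ("i_x", "í"), ("o_x", "ó"), ("u_x", "ú")]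
  accents.items.foldl (fun w kv => PySem.Str.replace w kv.1 kv.2) word

-- ===== PORT B =====
def pvAccent (c : Char) : Char :=
  if c = 'a' then 'á' else if c = 'e' then 'é' else if c = 'i' then 'í'
  else if c = 'o' then 'ó' else 'ú'

def pvIsVowel (c : Char) : Bool :=
  c == 'a' || c == 'e' || c == 'i' || c == 'o' || c == 'u'

-- single left-to-right scan, as Source B's while loop: consume 3 chars on a marker, else 1
def pvScan : List Char → List Char
  | [] => []
  | c :: rest =>
    if pvIsVowel c = true ∧ rest.take 2 = ['_', 'x'] then
      pvAccent c :: pvScan (rest.drop 2)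
    else
      c :: pvScan rest
termination_by l => l.length
decreasing_by
  all_goals first | (simp; omega) | simp

def process_letters_alt (word : String) : String :=
  String.ofList (pvScan word.toList)

-- ===== PRECONDITION & SPEC =====
def Spec_process_letters (word : String) (out : String) : Prop := out = process_letters_alt word
instance (word : String) (out : String) : Decidable (Spec_process_letters word out) := by unfold Spec_process_letters; infer_instance

-- ===== CLAIM (what is proved, stated in full; the proofs are below) =====
def Claim_equal_process_letters : Prop := ∀ (word : String), Dom_process_letters word → Spec_process_letters word (process_letters word)

-- ===== LEMMAS AND PROOFS =====

-- clean recursive form of Python's str.replace (old ≠ [])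
def repC (old new : List Char) : List Char → List Char
  | [] => []
  | c :: t =>
    if old.isPrefixOf (c :: t) then new ++ repC old new (t.drop (old.length - 1))
    else c :: repC old new t
termination_by l => l.length
decreasing_by
  all_goals first | (simp; omega) | simp

lemma go_eq_repC (old new : List Char) (hold : old ≠ []) :
    ∀ fuel l acc, l.length ≤ fuel →
      PySem.Chars.replace.go old new fuel l acc = acc.reverse ++ repC old new l := by
  intro fuel
  induction fuel with
  | zero =>
    intro l acc hl
    have : l = [] := by cases l <;> simp_all
    subst this
    rw [PySem.Chars.replace.go, repC]
  | succ n ih =>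
    intro l acc hl
    cases l with
    | nil =>
      rw [PySem.Chars.replace.go, repC]
      all_goals simp
    | cons c t =>
      rw [PySem.Chars.replace.go]
      by_cases hp : old.isPrefixOf (c :: t)
      · rw [if_pos hp, repC, if_pos hp]
        have hlen : 1 ≤ old.length := by cases old <;> simp_all
        have hdrop : (c :: t).drop old.length = t.drop (old.length - 1) := by
          cases old with
          | nil => simp_all
          | cons o os => simp
        rw [hdrop]
        rw [ih _ _ (by simp at hl ⊢; omega)]
        simp
      · rw [if_neg hp, repC, if_neg hp]
        rw [ih _ _ (by simp at hl ⊢; omega)]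
        simp

lemma replace_eq_repC (cs old new : List Char) (hold : old ≠ []) :
    PySem.Chars.replace cs old new = repC old new cs := by
  rw [PySem.Chars.replace]
  rw [if_neg (by simp [List.isEmpty_iff, hold])]
  rw [go_eq_repC old new hold cs.length cs [] le_rfl]
  simp

-- pass-through: no match at the head
lemma repC_cons_neg (old new : List Char) (c : Char) (t : List Char)
    (h : ¬ old.isPrefixOf (c :: t)) : repC old new (c :: t) = c :: repC old new t := by
  rw [repC, if_neg h]

-- marker pattern as prefix of c :: t
lemma marker_prefix_iff (v c : Char) (t : List Char) :
    ([v, '_', 'x'].isPrefixOf (c :: t) = true) ↔ (c = v ∧ t.take 2 = ['_', 'x']) := by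
  cases t with
  | nil => simp [List.isPrefixOf]
  | cons b t' =>
    cases t' with
    | nil => simp [List.isPrefixOf]
    | cons d t'' =>
      simp [List.isPrefixOf]
      constructor
      · rintro ⟨h1, h2, h3⟩; exact ⟨h1.symm, h2.symm, h3.symm⟩
      · rintro ⟨h1, h2, h3⟩; exact ⟨h1.symm, h2.symm, h3.symm⟩

-- generalised scanner: pvScan with the vowel test abstracted out
def scanS (p : Char → Bool) : List Char → List Char
  | [] => []
  | c :: rest =>
    if p c = true ∧ rest.take 2 = ['_', 'x'] then
      pvAccent c :: scanS p (rest.drop 2)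
    else
      c :: scanS p rest
termination_by l => l.length
decreasing_by
  all_goals first | (simp; omega) | simp

lemma vowel_cases (c : Char) (h : pvIsVowel c = true) :
    c = 'a' ∨ c = 'e' ∨ c = 'i' ∨ c = 'o' ∨ c = 'u' := by
  simp [pvIsVowel] at h
  tauto

lemma accent_not_vowel (c : Char) (h : pvIsVowel c = true) :
    pvIsVowel (pvAccent c) = false := by
  rcases vowel_cases c h with h | h | h | h | h <;> subst h <;> decide

lemma accent_ne_underscore (c : Char) (h : pvIsVowel c = true) :
    pvAccent c ≠ '_' := by
  rcases vowel_cases c h with h | h | h | h | h <;> subst h <;> decide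

lemma accent_ne_x (c : Char) (h : pvIsVowel c = true) :
    pvAccent c ≠ 'x' := by
  rcases vowel_cases c h with h | h | h | h | h <;> subst h <;> decide

lemma accent_ne (c v : Char) (hc : pvIsVowel c = true) (hv : pvIsVowel v = true) :
    pvAccent c ≠ v := by
  intro h
  have := accent_not_vowel c hc
  rw [h, hv] at this
  exact Bool.false_ne_true this.symm

-- heads of (scanS p l) agree with heads of l as far as the marker shape goes
lemma take1_scanS (p : Char → Bool) (hp : ∀ c, p c = true → pvIsVowel c = true)
    (l : List Char) : ((scanS p l).take 1 = ['x']) ↔ (l.take 1 = ['x']) := by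
  cases l with
  | nil => simp [scanS]
  | cons d r =>
    rw [scanS]
    by_cases h : p d = true ∧ r.take 2 = ['_', 'x']
    · rw [if_pos h]
      have hdx : d ≠ 'x' := by
        intro hd; subst hd
        have := hp _ h.1
        exact absurd this (by decide)
      simp [accent_ne_x d (hp _ h.1), hdx]
    · rw [if_neg h]; simp

lemma take2_scanS (p : Char → Bool) (hp : ∀ c, p c = true → pvIsVowel c = true)
    (l : List Char) : ((scanS p l).take 2 = ['_', 'x']) ↔ (l.take 2 = ['_', 'x']) := by
  cases l with
  | nil => simp [scanS]
  | cons c r =>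
    rw [scanS]
    by_cases h : p c = true ∧ r.take 2 = ['_', 'x']
    · rw [if_pos h]
      have hcu : c ≠ '_' := by
        intro hc; subst hc
        have := hp _ h.1
        exact absurd this (by decide)
      simp [accent_ne_underscore c (hp _ h.1), hcu]
    · rw [if_neg h]
      have h1 := take1_scanS p hp r
      cases r with
      | nil => simp [scanS]
      | cons d r' =>
        cases hs : scanS p (d :: r') with
        | nil =>
          exfalso
          rw [scanS] at hs
          split at hs <;> simp_all
        | cons e r'' =>
          rw [hs] at h1
          simp at h1 ⊢
          tauto

-- one replace pass on top of the scan for p = the scan for p extended with v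
lemma scan_step (p : Char → Bool) (v : Char)
    (hp : ∀ c, p c = true → pvIsVowel c = true)
    (hv : pvIsVowel v = true) (hpv : p v = false) :
    ∀ l : List Char,
      repC [v, '_', 'x'] [pvAccent v] (scanS p l) = scanS (fun c => p c || c == v) l
  | [] => by simp [scanS, repC]
  | c :: rest => by
    rw [scanS, scanS]
    by_cases h1 : p c = true ∧ rest.take 2 = ['_', 'x']
    · -- old marker: head becomes an accent, which the v-pass skips over
      rw [if_pos h1, if_pos ⟨by simp [h1.1], h1.2⟩]
      rw [repC_cons_neg _ _ _ _ (by
        rw [marker_prefix_iff]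
        rintro ⟨hc, -⟩
        exact accent_ne c v (hp _ h1.1) hv hc)]
      rw [scan_step p v hp hv hpv (rest.drop 2)]
    · rw [if_neg h1]
      by_cases h2 : c = v ∧ rest.take 2 = ['_', 'x']
      · -- new marker for v
        rw [if_pos ⟨by simp [h2.1], h2.2⟩]
        obtain ⟨hc, htake⟩ := h2
        rw [hc]
        have hrest : rest = '_' :: 'x' :: rest.drop 2 := by
          cases rest with
          | nil => simp at htake
          | cons b t' =>
            cases t' with
            | nil => simp at htake
            | cons d t'' =>
              simp [List.take] at htake
              simp [htake.1, htake.2]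
        have hpu : p '_' = false := by
          cases hu : p '_' with
          | false => rfl
          | true => exact absurd (hp _ hu) (by decide)
        have hpx : p 'x' = false := by
          cases hx : p 'x' with
          | false => rfl
          | true => exact absurd (hp _ hx) (by decide)
        conv_lhs => rw [hrest]
        rw [scanS, if_neg (by simp [hpu]), scanS, if_neg (by simp [hpx])]
        rw [repC, if_pos (by rw [marker_prefix_iff]; simp)]
        simp only [List.length_cons, List.length_nil, List.drop_succ_cons, List.drop_zero,
          List.singleton_append]
        rw [scan_step p v hp hv hpv (rest.drop 2)]
      · -- no marker at all: plain pass-through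
        rw [if_neg (by
          rintro ⟨hq, htake⟩
          rcases (by simpa using hq : p c = true ∨ c = v) with hq' | hq'
          · exact h1 ⟨hq', htake⟩
          · exact h2 ⟨hq', htake⟩)]
        rw [repC_cons_neg _ _ _ _ (by
          rw [marker_prefix_iff]
          rintro ⟨hc, htake⟩
          exact h2 ⟨hc, (take2_scanS p hp rest).mp htake⟩)]
        rw [scan_step p v hp hv hpv rest]
termination_by l => l.length
decreasing_by
  all_goals first | (simp; omega) | simp

lemma scanS_false (l : List Char) : scanS (fun _ => false) l = l := by
  induction l using scanS.induct (p := fun _ => false) with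
  | case1 => rw [scanS]
  | case2 c rest h ih => simp at h
  | case3 c rest h ih => rw [scanS, if_neg h, ih]

lemma scanS_congr (p q : Char → Bool) (hpq : ∀ c, p c = q c) :
    ∀ l : List Char, scanS p l = scanS q l
  | [] => by rw [scanS, scanS]
  | c :: rest => by
    rw [scanS, scanS, hpq c]
    by_cases h : q c = true ∧ rest.take 2 = ['_', 'x']
    · rw [if_pos h, if_pos h, scanS_congr p q hpq (rest.drop 2)]
    · rw [if_neg h, if_neg h, scanS_congr p q hpq rest]
termination_by l => l.length
decreasing_by
  all_goals first | (simp; omega) | simp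

lemma pvScan_eq_scanS : ∀ l : List Char, pvScan l = scanS pvIsVowel l
  | [] => by rw [pvScan, scanS]
  | c :: rest => by
    rw [pvScan, scanS]
    by_cases h : pvIsVowel c = true ∧ rest.take 2 = ['_', 'x']
    · rw [if_pos h, if_pos h, pvScan_eq_scanS (rest.drop 2)]
    · rw [if_neg h, if_neg h, pvScan_eq_scanS rest]
termination_by l => l.length
decreasing_by
  all_goals first | (simp; omega) | simp

-- the five-pass composite equals the one-pass scan
lemma compose_eq_scan (l : List Char) :
    repC ['u', '_', 'x'] ['ú'] (repC ['o', '_', 'x'] ['ó'] (repC ['i', '_', 'x'] ['í']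
      (repC ['e', '_', 'x'] ['é'] (repC ['a', '_', 'x'] ['á'] l)))) = pvScan l := by
  have t1 : repC ['a', '_', 'x'] ['á'] l = scanS (fun c => false || c == 'a') l := by
    conv_lhs => rw [show l = scanS (fun _ => false) l from (scanS_false l).symm]
    exact scan_step (fun _ => false) 'a' (by intro c h; simp at h) (by decide) rfl l
  have t2 : repC ['e', '_', 'x'] ['é'] (scanS (fun c => false || c == 'a') l)
      = scanS (fun c => (false || c == 'a') || c == 'e') l :=
    scan_step (fun c => false || c == 'a') 'e'
      (by intro c h; simp at h; subst h; decide) (by decide) (by decide) l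
  have t3 : repC ['i', '_', 'x'] ['í'] (scanS (fun c => (false || c == 'a') || c == 'e') l)
      = scanS (fun c => ((false || c == 'a') || c == 'e') || c == 'i') l :=
    scan_step (fun c => (false || c == 'a') || c == 'e') 'i'
      (by intro c h; simp at h; rcases h with h | h <;> subst h <;> decide)
      (by decide) (by decide) l
  have t4 : repC ['o', '_', 'x'] ['ó']
        (scanS (fun c => ((false || c == 'a') || c == 'e') || c == 'i') l)
      = scanS (fun c => (((false || c == 'a') || c == 'e') || c == 'i') || c == 'o') l :=
    scan_step (fun c => ((false || c == 'a') || c == 'e') || c == 'i') 'o'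
      (by intro c h; simp at h; rcases h with (h | h) | h <;> subst h <;> decide)
      (by decide) (by decide) l
  have t5 : repC ['u', '_', 'x'] ['ú']
        (scanS (fun c => (((false || c == 'a') || c == 'e') || c == 'i') || c == 'o') l)
      = scanS (fun c => ((((false || c == 'a') || c == 'e') || c == 'i') || c == 'o') || c == 'u') l :=
    scan_step (fun c => (((false || c == 'a') || c == 'e') || c == 'i') || c == 'o') 'u'
      (by intro c h; simp at h; rcases h with ((h | h) | h) | h <;> subst h <;> decide)
      (by decide) (by decide) l
  rw [t1, t2, t3, t4, t5]
  rw [scanS_congr _ pvIsVowel (by intro c; simp [pvIsVowel]) l]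
  exact (pvScan_eq_scanS l).symm

theorem process_letters_eq (word : String) :
    process_letters word = process_letters_alt word := by
  show (PySem.Dict.mk [("a_x", "á"), ("e_x", "é"), ("i_x", "í"), ("o_x", "ó"), ("u_x", "ú")]).items.foldl
      (fun w kv => PySem.Str.replace w kv.1 kv.2) word = process_letters_alt word
  have hitems : (PySem.Dict.mk [("a_x", "á"), ("e_x", "é"), ("i_x", "í"), ("o_x", "ó"), ("u_x", "ú")]).items
      = [("a_x", "á"), ("e_x", "é"), ("i_x", "í"), ("o_x", "ó"), ("u_x", "ú")] := rfl
  rw [hitems]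
  simp only [List.foldl_cons, List.foldl_nil]
  unfold process_letters_alt
  simp only [PySem.Str.replace, String.toList_ofList]
  rw [replace_eq_repC _ _ _ (by decide), replace_eq_repC _ _ _ (by decide),
      replace_eq_repC _ _ _ (by decide), replace_eq_repC _ _ _ (by decide),
      replace_eq_repC _ _ _ (by decide)]
  congr 1
  have ha : "a_x".toList = ['a', '_', 'x'] := by decide
  have he : "e_x".toList = ['e', '_', 'x'] := by decide
  have hi : "i_x".toList = ['i', '_', 'x'] := by decide
  have ho : "o_x".toList = ['o', '_', 'x'] := by decide
  have hu : "u_x".toList = ['u', '_', 'x'] := by decide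
  have ha' : "á".toList = ['á'] := by decide
  have he' : "é".toList = ['é'] := by decide
  have hi' : "í".toList = ['í'] := by decide
  have ho' : "ó".toList = ['ó'] := by decide
  have hu' : "ú".toList = ['ú'] := by decide
  rw [ha, he, hi, ho, hu, ha', he', hi', ho', hu']
  exact compose_eq_scan word.toList

-- ===== VERDICT (by name: the statement is the Claim_ definition above) =====
theorem process_letters_spec : Claim_equal_process_letters := by
  intro word _
  unfold Spec_process_letters
  exact process_letters_eq word
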